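-- pv_equiv track=rewrite | github.com/AlexWUrobot/leetcode_python | Maximum_Number_of_Subjects_Passed.py | max_subjects_passed
-- ===== SOURCE A (Python) =====
-- def max_subjects_passed(answered, needed, q):
--     n = len(answered)
--     # Calculate the additional answers needed for each subject
--     additional_needed = [max(0, needed[i] - answered[i]) for i in range(n)]
--     # Sort subjects by additional needed answers
--     sorted_subjects = sorted(range(n), key=lambda i: additional_needed[i])
--
--     subjects_passed = 0
--     subjects_passed_indices = []  # List to store indices of subjects passed
--     for i in sorted_subjects:
--         # Distribute available extra answers to pass subjects
--         if q >= additional_needed[i]: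
--             q -= additional_needed[i]
--             subjects_passed += 1
--             subjects_passed_indices.append(i)
--         else:
--             break
--
--     return subjects_passed, subjects_passed_indices
-- ===== SOURCE B (Python) =====
-- def max_subjects_passed(answered, needed, q):
--     # Costs to pass each subject; zip pairs answers with requirements.
--     additional = [max(0, nd - a) for a, nd in zip(answered, needed)]
--     # Stable ascending order of subject indices by cost.
--     order = sorted(range(len(additional)), key=additional.__getitem__)
--     # Prefix sums of the sorted costs.
--     prefix = []
--     total = 0
--     for i in order:
--         total += additional[i]
--         prefix.append(total)
--     # Binary search (bisect_right) for how many prefix sums fit in q.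
--     lo, hi = 0, len(prefix)
--     while lo < hi:
--         mid = (lo + hi) // 2
--         if q < prefix[mid]:
--             hi = mid
--         else:
--             lo = mid + 1
--     return lo, order[:lo]
-- ===== Notes on version B (the rewrite author's own statement) =====
-- stated objective: alternative
-- what changed: B pairs costs via zip, builds prefix sums of the stably sorted costs and finds the passable count with one bisect_right binary search plus a slice, instead of A's incremental subtract-from-budget loop with break that appends indices one by one.
import Mathlib
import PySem

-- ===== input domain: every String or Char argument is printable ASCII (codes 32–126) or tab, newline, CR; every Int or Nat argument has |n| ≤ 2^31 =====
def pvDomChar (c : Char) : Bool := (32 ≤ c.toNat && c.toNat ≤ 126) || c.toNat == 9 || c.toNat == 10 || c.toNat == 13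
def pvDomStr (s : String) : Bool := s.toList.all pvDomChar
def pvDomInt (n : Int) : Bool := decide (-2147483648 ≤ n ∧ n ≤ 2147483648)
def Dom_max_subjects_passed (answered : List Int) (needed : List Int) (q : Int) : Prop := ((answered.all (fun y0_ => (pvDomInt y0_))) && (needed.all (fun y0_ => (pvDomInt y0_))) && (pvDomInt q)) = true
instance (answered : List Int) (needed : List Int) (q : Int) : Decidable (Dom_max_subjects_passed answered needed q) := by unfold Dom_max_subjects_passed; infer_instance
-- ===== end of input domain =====

-- B replaces A's subtract-and-break greedy loop by prefix sums of the sorted costs plus a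
-- bisect_right binary search and a slice (alternative decomposition, same asymptotic cost).


-- ===== PORT A =====
-- A's 'for i in sorted_subjects: … else: break' loop, with state (q, count, indices).
def pvLoopA (add : List Int) : List Int → Int → Int → List Int → Int × List Int
  | [], _, c, acc => (c, acc)
  | i :: rest, q, c, acc =>
    let a := PySem.List.pyGetD add i 0
    if a ≤ q then pvLoopA add rest (q - a) (c + 1) (acc ++ [i])
    else (c, acc)

def max_subjects_passed (answered : List Int) (needed : List Int) (q : Int) : Int × List Int :=
  let n : Int := answered.length
  let additional := (PySem.List.pyRange 0 n 1).map
    (fun i => max 0 (PySem.List.pyGetD needed i 0 - PySem.List.pyGetD answered i 0))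
  let sorted_subjects := PySem.List.sorted (PySem.List.pyRange 0 n 1)
    (fun i => PySem.List.pyGetD additional i 0) false
  pvLoopA additional sorted_subjects q 0 []

-- ===== PORT B =====
def max_subjects_passed_alt (answered : List Int) (needed : List Int) (q : Int) : Int × List Int :=
  let additional := (answered.zip needed).map (fun p => max 0 (p.2 - p.1))
  let order := PySem.List.sorted (PySem.List.pyRange 0 (additional.length : Int) 1)
    (fun i => PySem.List.pyGetD additional i 0) false
  -- prefix-sum loop: state (total, prefix)
  let st := order.foldl
    (fun (s : Int × List Int) i =>
      let t := s.1 + PySem.List.pyGetD additional i 0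
      (t, s.2 ++ [t])) ((0 : Int), ([] : List Int))
  -- Source B's lo/hi while loop is the textbook bisect_right binary search = PySem.List.bisectRight
  let lo := PySem.List.bisectRight st.2 q
  ((lo : Int), PySem.List.slice order none (some (lo : Int)))

-- ===== PRECONDITION & SPEC =====
-- Pre_ excludes exactly the inputs where A raises IndexError (needed shorter than answered).
def Pre_max_subjects_passed (answered : List Int) (needed : List Int) (q : Int) : Prop :=
  answered.length ≤ needed.length
instance (answered : List Int) (needed : List Int) (q : Int) : Decidable (Pre_max_subjects_passed answered needed q) := by unfold Pre_max_subjects_passed; infer_instance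

def pvWitness_max_subjects_passed : List Int × List Int × Int := ([0, 3], [1, 2], 2)

def Spec_max_subjects_passed (answered : List Int) (needed : List Int) (q : Int) (out : Int × List Int) : Prop := out = max_subjects_passed_alt answered needed q
instance (answered : List Int) (needed : List Int) (q : Int) (out : Int × List Int) : Decidable (Spec_max_subjects_passed answered needed q out) := by unfold Spec_max_subjects_passed; infer_instance

-- ===== CLAIM (what is proved, stated in full; the proofs are below) =====
def Claim_equal_max_subjects_passed : Prop := ∀ (answered : List Int) (needed : List Int) (q : Int), Dom_max_subjects_passed answered needed q → Pre_max_subjects_passed answered needed q → Spec_max_subjects_passed answered needed q (max_subjects_passed answered needed q)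


-- ===== LEMMAS AND PROOFS =====

-- the greedy count of A's loop, isolated
def pvGCount (add : List Int) : List Int → Int → Nat
  | [], _ => 0
  | i :: rest, q =>
    if PySem.List.pyGetD add i 0 ≤ q then pvGCount add rest (q - PySem.List.pyGetD add i 0) + 1
    else 0

-- the prefix-sum list B's foldl builds, isolated
def pvPref (add : List Int) : List Int → Int → List Int
  | [], _ => []
  | i :: rest, t => (t + PySem.List.pyGetD add i 0) :: pvPref add rest (t + PySem.List.pyGetD add i 0)

theorem pvLoopA_eq (add : List Int) : ∀ (l : List Int) (q c : Int) (acc : List Int),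
    pvLoopA add l q c acc = (c + (pvGCount add l q : Int), acc ++ l.take (pvGCount add l q)) := by
  intro l
  induction l with
  | nil => intro q c acc; simp [pvLoopA, pvGCount]
  | cons i rest ih =>
    intro q c acc
    simp only [pvLoopA, pvGCount]
    split_ifs with hle
    · rw [ih]
      refine Prod.ext ?_ ?_
      · push_cast; ring
      · simp [List.take_succ_cons]
    · simp

theorem pvFoldl_pref (add : List Int) : ∀ (l : List Int) (t : Int) (pre : List Int),
    l.foldl (fun (s : Int × List Int) i =>
      (s.1 + PySem.List.pyGetD add i 0, s.2 ++ [s.1 + PySem.List.pyGetD add i 0])) (t, pre)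
    = (t + (l.map (fun i => PySem.List.pyGetD add i 0)).sum, pre ++ pvPref add l t) := by
  intro l
  induction l with
  | nil => intro t pre; simp [pvPref]
  | cons i rest ih =>
    intro t pre
    simp only [List.foldl_cons, List.map_cons, List.sum_cons, pvPref]
    rw [ih]
    refine Prod.ext ?_ ?_
    · push_cast; ring
    · simp

theorem pvGetD_nonneg (add : List Int) (h : ∀ x ∈ add, 0 ≤ x) (i : Int) :
    0 ≤ PySem.List.pyGetD add i 0 := by
  by_cases hr : PySem.Raise.InRange add.length i
  · exact h _ (PySem.List.pyGetD_mem add 0 hr)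
  · rw [PySem.List.pyGetD_of_none add i 0 ((PySem.List.pyGet?_eq_none_iff add i).2 hr)]

theorem pvPref_length (add : List Int) : ∀ (l : List Int) (t : Int), (pvPref add l t).length = l.length := by
  intro l
  induction l with
  | nil => intro t; rfl
  | cons i rest ih => intro t; simp [pvPref, ih]

theorem pvPref_ge (add : List Int) (h : ∀ x ∈ add, 0 ≤ x) :
    ∀ (l : List Int) (t : Int), ∀ x ∈ pvPref add l t, t ≤ x := by
  intro l
  induction l with
  | nil => intro t x hx; simp [pvPref] at hx
  | cons i rest ih =>
    intro t x hx
    have ha := pvGetD_nonneg add h i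
    simp only [pvPref, List.mem_cons] at hx
    rcases hx with rfl | hx
    · omega
    · have := ih (t + PySem.List.pyGetD add i 0) x hx
      omega

theorem pvPref_pairwise (add : List Int) (h : ∀ x ∈ add, 0 ≤ x) :
    ∀ (l : List Int) (t : Int), (pvPref add l t).Pairwise (· ≤ ·) := by
  intro l
  induction l with
  | nil => intro t; simp [pvPref]
  | cons i rest ih =>
    intro t
    simp only [pvPref, List.pairwise_cons]
    exact ⟨fun x hx => pvPref_ge add h rest _ x hx, ih _⟩

theorem pvGCount_le (add : List Int) : ∀ (l : List Int) (q : Int), pvGCount add l q ≤ l.length := by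
  intro l
  induction l with
  | nil => intro q; simp [pvGCount]
  | cons i rest ih =>
    intro q
    simp only [pvGCount, List.length_cons]
    split_ifs with hle
    · exact Nat.succ_le_succ (ih _)
    · omega

theorem pvGCount_char (add : List Int) (h : ∀ x ∈ add, 0 ≤ x) :
    ∀ (l : List Int) (t q : Int) (j : Nat) (hj : j < (pvPref add l t).length),
      (j < pvGCount add l (q - t) → (pvPref add l t)[j] ≤ q) ∧
      (pvGCount add l (q - t) ≤ j → q < (pvPref add l t)[j]) := by
  intro l
  induction l with
  | nil => intro t q j hj; simp [pvPref] at hj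
  | cons i rest ih =>
    intro t q j hj
    have ha := pvGetD_nonneg add h i
    simp only [pvPref] at hj ⊢
    by_cases hle : PySem.List.pyGetD add i 0 ≤ q - t
    · rw [show pvGCount add (i :: rest) (q - t) = pvGCount add rest (q - t - PySem.List.pyGetD add i 0) + 1 from by
        simp [pvGCount, hle]]
      cases j with
      | zero => exact ⟨fun _ => by simpa using by omega, fun hc => by omega⟩
      | succ j' =>
        have := ih (t + PySem.List.pyGetD add i 0) q j' (by simpa using Nat.lt_of_succ_lt_succ hj)
        rw [show q - (t + PySem.List.pyGetD add i 0) = q - t - PySem.List.pyGetD add i 0 from by ring] at this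
        simpa using ⟨fun hlt => this.1 (by omega), fun hge => this.2 (by omega)⟩
    · rw [show pvGCount add (i :: rest) (q - t) = 0 from by simp [pvGCount, hle]]
      refine ⟨fun hlt => by omega, fun _ => ?_⟩
      cases j with
      | zero => simpa using by omega
      | succ j' =>
        have hmem : (pvPref add rest (t + PySem.List.pyGetD add i 0))[j']'(by simpa using Nat.lt_of_succ_lt_succ hj) ∈ pvPref add rest (t + PySem.List.pyGetD add i 0) := List.getElem_mem _
        have := pvPref_ge add h rest (t + PySem.List.pyGetD add i 0) _ hmem
        simpa using by omega

theorem pvGCount_eq_bisect (add : List Int) (h : ∀ x ∈ add, 0 ≤ x) (l : List Int) (q : Int) :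
    pvGCount add l q = PySem.List.bisectRight (pvPref add l 0) q := by
  obtain ⟨hble, hlo, hhi⟩ := PySem.List.bisectRight_spec (pvPref add l 0) q (pvPref_pairwise add h l 0)
  have hgl : pvGCount add l q ≤ (pvPref add l 0).length := by
    rw [pvPref_length]; exact pvGCount_le add l q
  have hq : q - 0 = q := by ring
  rcases Nat.lt_trichotomy (pvGCount add l q) (PySem.List.bisectRight (pvPref add l 0) q) with hlt | heq | hgt
  · have hj : pvGCount add l q < (pvPref add l 0).length := lt_of_lt_of_le hlt hble
    have h1 := (pvGCount_char add h l 0 q _ hj).2 (by rw [hq])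
    have h2 := hlo _ hj hlt
    omega
  · exact heq
  · have hj : PySem.List.bisectRight (pvPref add l 0) q < (pvPref add l 0).length := lt_of_lt_of_le hgt hgl
    have h1 := (pvGCount_char add h l 0 q _ hj).1 (by rw [hq]; exact hgt)
    have h2 := hhi _ hj (le_refl _)
    omega

theorem pvAdd_eq (answered needed : List Int) (h : answered.length ≤ needed.length) :
    (PySem.List.pyRange 0 (answered.length : Int) 1).map
      (fun i => max 0 (PySem.List.pyGetD needed i 0 - PySem.List.pyGetD answered i 0))
    = (answered.zip needed).map (fun p => max 0 (p.2 - p.1)) := by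
  apply List.ext_getElem
  · simp [PySem.List.length_pyRange_one]; omega
  · intro k h1 h2
    have hk1 : k < answered.length := by
      simpa [PySem.List.length_pyRange_one] using h1
    have hk2 : k < needed.length := lt_of_lt_of_le hk1 h
    simp [PySem.List.getElem_pyRange_one, List.getElem_zip,
      List.getElem?_eq_getElem hk1, List.getElem?_eq_getElem hk2]

-- ===== VERDICT (by name: the statement is the Claim_ definition above) =====
theorem max_subjects_passed_spec : Claim_equal_max_subjects_passed := by
  intro answered needed q hdom hpre
  unfold Pre_max_subjects_passed at hpre
  unfold Spec_max_subjects_passed max_subjects_passed max_subjects_passed_alt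
  simp only []
  rw [pvAdd_eq answered needed hpre]
  set add := (answered.zip needed).map (fun p => max 0 (p.2 - p.1)) with hadd
  have hnn : ∀ x ∈ add, 0 ≤ x := by
    intro x hx
    rw [hadd] at hx
    simp only [List.mem_map] at hx
    obtain ⟨p, -, rfl⟩ := hx
    exact le_max_left _ _
  have hlen : add.length = answered.length := by
    rw [hadd]; simp; omega
  rw [hlen]
  set order := PySem.List.sorted (PySem.List.pyRange 0 (answered.length : Int) 1)
    (fun i => PySem.List.pyGetD add i 0) false with horder
  rw [pvLoopA_eq, pvFoldl_pref]
  simp only [List.nil_append, zero_add]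
  rw [← pvGCount_eq_bisect add hnn order q]
  rw [PySem.List.slice_to_natCast]
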